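-- pv_equiv track=rewrite | github.com/shrijanikorepaka/SoC-Al-Gore-Rhythmic-Ascent-24B0905 | Week 4/minimal_difference.py | shortest_dominated_subarrays
-- ===== SOURCE A (Python) =====
-- def shortest_dominated_subarrays(test_cases):
--     results = []
--
--     for a in test_cases:
--         last_index = {}
--         min_len = float('inf')
--         for i, val in enumerate(a):
--             if val in last_index:
--                 # i - last_index[val] + 1 is the subarray length
--                 min_len = min(min_len, i - last_index[val] + 1)
--             last_index[val] = i
--
--         results.append(min_len if min_len != float('inf') else -1)
--
--     return results
-- ===== SOURCE B (Python) =====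
-- def shortest_dominated_subarrays(test_cases):
--     results = []
--     for a in test_cases:
--         groups = {}
--         for i, val in enumerate(a):
--             groups.setdefault(val, []).append(i)
--         best = None
--         for idxs in groups.values():
--             for j, k in zip(idxs, idxs[1:]):
--                 gap = k - j + 1
--                 if best is None or gap < best:
--                     best = gap
--         results.append(best if best is not None else -1)
--     return results
-- ===== Notes on version B (the rewrite author's own statement) =====
-- stated objective: alternative
-- what changed: Replaced A's single inline pass keeping only each value's last-seen index by a two-phase decomposition: first build a dict mapping each value to the full list of its occurrence indices, then scan each group's consecutive gaps for the global minimum.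
import Mathlib
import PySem

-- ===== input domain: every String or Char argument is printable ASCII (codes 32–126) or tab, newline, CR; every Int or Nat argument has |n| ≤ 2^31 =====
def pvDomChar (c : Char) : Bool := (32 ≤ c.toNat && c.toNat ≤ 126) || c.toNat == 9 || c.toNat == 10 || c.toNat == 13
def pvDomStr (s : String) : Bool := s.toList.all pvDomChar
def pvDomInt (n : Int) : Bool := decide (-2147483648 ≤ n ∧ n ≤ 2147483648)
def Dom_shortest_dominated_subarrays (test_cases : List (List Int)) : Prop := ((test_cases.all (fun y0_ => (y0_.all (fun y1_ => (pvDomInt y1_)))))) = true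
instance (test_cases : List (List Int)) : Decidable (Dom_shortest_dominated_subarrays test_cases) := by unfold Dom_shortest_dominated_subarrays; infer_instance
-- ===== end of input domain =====

-- B replaces A's single inline pass (dict of last-seen index) by a two-phase decomposition:
-- build a dict mapping each value to all its occurrence indices, then scan each group's
-- consecutive gaps for the global minimum (objective: alternative; same cost).

-- ===== PORT A =====
-- inner-loop step of A: `if val in last_index: min_len = min(min_len, i - last_index[val] + 1); last_index[val] = i`
-- (min_len : Option Int, none = float('inf'))
def pvStepA (st : PySem.Dict Int Int × Option Int) (p : Int × Int) : PySem.Dict Int Int × Option Int :=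
  match st.1.get? p.2 with
  | some j =>
      (st.1.insert p.2 p.1,
       some (match st.2 with
             | none => p.1 - j + 1
             | some m => min m (p.1 - j + 1)))
  | none => (st.1.insert p.2 p.1, st.2)

def shortest_dominated_subarrays (test_cases : List (List Int)) : List Int :=
  test_cases.foldl (fun results a =>
    let st := (PySem.List.enumerate a 0).foldl pvStepA (PySem.Dict.empty, none)
    results ++ [match st.2 with | none => -1 | some m => m]) []

-- ===== PORT B =====
-- `if best is None or gap < best: best = gap`
def pvOm (b : Option Int) (gap : Int) : Option Int :=
  match b with
  | none => some gap
  | some m => if gap < m then some gap else some m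

def shortest_dominated_subarrays_alt (test_cases : List (List Int)) : List Int :=
  test_cases.foldl (fun results a =>
    -- phase 1: groups[val] = list of indices where val occurs
    let groups := (PySem.List.enumerate a 0).foldl
      (fun d p => d.modify p.2 [] (· ++ [p.1])) PySem.Dict.empty
    -- phase 2: min over consecutive gaps inside each group
    let best := groups.values.foldl
      (fun b idxs =>
        (List.zip idxs (PySem.List.slice idxs (some 1) none)).foldl
          (fun b jk => pvOm b (jk.2 - jk.1 + 1)) b) none
    results ++ [match best with | none => -1 | some m => m]) []

-- ===== PRECONDITION & SPEC =====
def Spec_shortest_dominated_subarrays (test_cases : List (List Int)) (out : List Int) : Prop := out = shortest_dominated_subarrays_alt test_cases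
instance (test_cases : List (List Int)) (out : List Int) : Decidable (Spec_shortest_dominated_subarrays test_cases out) := by unfold Spec_shortest_dominated_subarrays; infer_instance

-- ===== CLAIM (what is proved, stated in full; the proofs are below) =====
def Claim_equal_shortest_dominated_subarrays : Prop := ∀ (test_cases : List (List Int)), Dom_shortest_dominated_subarrays test_cases → Spec_shortest_dominated_subarrays test_cases (shortest_dominated_subarrays test_cases)

-- ===== LEMMAS AND PROOFS =====

-- indices of occurrences of v in E (E is an enumerated list: (index, value) pairs)
def pvPos (E : List (Int × Int)) (v : Int) : List Int :=
  (E.filter (fun p => p.2 == v)).map (·.1)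

-- consecutive gaps (+1) of an index list
def pvGaps : List Int → List Int
  | [] => []
  | [_] => []
  | a :: b :: t => (b - a + 1) :: pvGaps (b :: t)

-- the multiset of all consecutive-occurrence gaps, grouped by value
def pvFlatG (E : List (Int × Int)) : List Int :=
  (PySem.List.dedup (E.map (·.2))).flatMap (fun v => pvGaps (pvPos E v))

theorem pvOm_eq_min (m g : Int) : pvOm (some m) g = some (min m g) := by
  simp only [pvOm]; split_ifs <;> simp only [Option.some.injEq] <;> omega

theorem pvOm_comm (b : Option Int) (x y : Int) : pvOm (pvOm b x) y = pvOm (pvOm b y) x := by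
  cases b with
  | none => show pvOm (some x) y = pvOm (some y) x; simp only [pvOm_eq_min, Option.some.injEq]; omega
  | some m => simp only [pvOm_eq_min, Option.some.injEq]; omega

theorem foldl_pvOm_comm (l : List Int) (b : Option Int) (x : Int) :
    l.foldl pvOm (pvOm b x) = pvOm (l.foldl pvOm b) x := by
  induction l generalizing b with
  | nil => rfl
  | cons g t ih => simp only [List.foldl_cons, pvOm_comm b x g, ih]

theorem pvZipFold (l : List Int) (b : Option Int) :
    (List.zip l l.tail).foldl (fun b jk => pvOm b (jk.2 - jk.1 + 1)) b
      = (pvGaps l).foldl pvOm b := by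
  induction l generalizing b with
  | nil => rfl
  | cons a t ih =>
    cases t with
    | nil => rfl
    | cons c t' => simp only [List.tail, List.zip, List.zipWith, List.foldl_cons, pvGaps]; exact ih _

theorem pvGaps_append (l : List Int) (i j : Int) (h : l.getLast? = some j) :
    pvGaps (l ++ [i]) = pvGaps l ++ [i - j + 1] := by
  induction l with
  | nil => simp at h
  | cons a t ih =>
    cases t with
    | nil => simp_all [pvGaps]
    | cons c t' =>
      simp only [List.cons_append, pvGaps]
      rw [← List.cons_append, ih (by simpa using h)]

theorem pvPos_append (E : List (Int × Int)) (p : Int × Int) (v : Int) :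
    pvPos (E ++ [p]) v = pvPos E v ++ (if p.2 == v then [p.1] else []) := by
  by_cases h : p.2 = v
  · simp [pvPos, List.filter_append, List.filter, h]
  · simp [pvPos, List.filter_append, List.filter, beq_eq_false_iff_ne.mpr h]

theorem pvPos_nil_iff (E : List (Int × Int)) (v : Int) :
    pvPos E v = [] ↔ v ∉ E.map (·.2) := by
  simp [pvPos, List.eq_nil_iff_forall_not_mem]

theorem pvDedup_append (l : List Int) (x : Int) :
    PySem.List.dedup (l ++ [x]) = if x ∈ l then PySem.List.dedup l else PySem.List.dedup l ++ [x] := by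
  simp only [PySem.List.dedup_eq_ofList, PySem.Set.ofList_eq_foldl, List.foldl_append,
    List.foldl_cons, List.foldl_nil]
  rw [PySem.Set.add]
  simp [PySem.Set.contains, ← PySem.Set.ofList_eq_foldl, PySem.Set.mem_ofList]

theorem pvStepMin (m : Option Int) (g : Int) :
    (some (match m with | none => g | some mm => min mm g) : Option Int) = pvOm m g := by
  cases m with
  | none => rfl
  | some mm => exact (pvOm_eq_min mm g).symm

theorem pvFoldl_mid (A gx C : List Int) (gnew : Int) :
    (A ++ (gx ++ [gnew]) ++ C).foldl pvOm none
      = pvOm ((A ++ gx ++ C).foldl pvOm none) gnew := by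
  simp only [List.foldl_append, List.foldl_cons, List.foldl_nil]
  rw [foldl_pvOm_comm]

theorem pvFlatMap_congr {α β : Type} (l : List α) (f g : α → List β)
    (h : ∀ v ∈ l, f v = g v) : l.flatMap f = l.flatMap g := by
  simp only [List.flatMap_def]
  rw [List.map_congr_left h]

-- A's inner loop invariant: the dict holds the last occurrence of each value,
-- and min_len is the fold of pvOm over all consecutive-occurrence gaps grouped by value.
theorem pvMain (E : List (Int × Int)) :
    (∀ v, ((E.foldl pvStepA (PySem.Dict.empty, none)).1.get? v = (pvPos E v).getLast?))
    ∧ (E.foldl pvStepA (PySem.Dict.empty, none)).2 = (pvFlatG E).foldl pvOm none := by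
  induction E using List.reverseRecOn with
  | nil =>
    refine ⟨fun v => ?_, ?_⟩
    · simp [pvPos, PySem.Dict.get?_empty]
    · simp [pvFlatG]
  | append_singleton E p ih =>
    obtain ⟨ih1, ih2⟩ := ih
    obtain ⟨i, x⟩ := p
    simp only [List.foldl_append, List.foldl_cons, List.foldl_nil]
    rcases hget : (E.foldl pvStepA (PySem.Dict.empty, none)).1.get? x with _ | j
    · -- x not seen before
      have hnil : pvPos E x = [] := by
        have := (ih1 x).symm.trans hget
        exact List.getLast?_eq_none_iff.mp this
      have hnotmem : x ∉ E.map (·.2) := (pvPos_nil_iff E x).mp hnil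
      constructor
      · intro v
        simp only [pvStepA, hget]
        by_cases hv : v = x
        · subst hv
          rw [PySem.Dict.get?_insert_self, pvPos_append]
          simp
        · rw [PySem.Dict.get?_insert_of_ne _ _ hv, pvPos_append, ih1 v]
          have hxv : x ≠ v := fun h => hv h.symm
          simp [hxv]
      · simp only [pvStepA, hget]
        have hded : PySem.List.dedup ((E ++ [(i, x)]).map (·.2))
            = PySem.List.dedup (E.map (·.2)) ++ [x] := by
          rw [List.map_append]
          simpa [hnotmem] using pvDedup_append (E.map (·.2)) x
        have hflat : pvFlatG (E ++ [(i, x)]) = pvFlatG E := by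
          unfold pvFlatG
          rw [hded, List.flatMap_append]
          have h1 : (PySem.List.dedup (E.map (·.2))).flatMap (fun v => pvGaps (pvPos (E ++ [(i, x)]) v))
              = (PySem.List.dedup (E.map (·.2))).flatMap (fun v => pvGaps (pvPos E v)) := by
            apply pvFlatMap_congr
            intro v hv
            have hvx : x ≠ v := fun h =>
              hnotmem (h ▸ ((PySem.List.mem_dedup _ _).mp hv))
            rw [pvPos_append]
            simp [fun h : x = v => hvx h]
          have h2 : ([x] : List Int).flatMap (fun v => pvGaps (pvPos (E ++ [(i, x)]) v)) = [] := by
            simp only [List.flatMap_cons, List.flatMap_nil, List.append_nil]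
            rw [pvPos_append, hnil]
            simp [pvGaps]
          rw [h1, h2, List.append_nil]
        rw [hflat]
        exact ih2
    · -- x seen before, last occurrence j
      have hlast : (pvPos E x).getLast? = some j := (ih1 x).symm.trans hget
      have hmem : x ∈ E.map (·.2) := by
        by_contra hc
        rw [(pvPos_nil_iff E x).mpr hc] at hlast
        simp at hlast
      constructor
      · intro v
        simp only [pvStepA, hget]
        by_cases hv : v = x
        · subst hv
          rw [PySem.Dict.get?_insert_self, pvPos_append]
          simp
        · rw [PySem.Dict.get?_insert_of_ne _ _ hv, pvPos_append, ih1 v]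
          have hxv : x ≠ v := fun h => hv h.symm
          simp [hxv]
      · simp only [pvStepA, hget]
        rw [pvStepMin, ih2]
        -- decompose the dedup list around x
        have hxd : x ∈ PySem.List.dedup (E.map (·.2)) := (PySem.List.mem_dedup _ _).mpr hmem
        obtain ⟨L1, L2, hEq⟩ := List.append_of_mem hxd
        have hnd : (L1 ++ x :: L2).Nodup := hEq ▸ PySem.List.nodup_dedup (E.map (·.2))
        have hx1 : x ∉ L1 := fun hm =>
          List.disjoint_of_nodup_append hnd hm (List.mem_cons_self ..)
        have hx2 : x ∉ L2 := (List.nodup_cons.mp hnd.of_append_right).1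
        have hded : PySem.List.dedup ((E ++ [(i, x)]).map (·.2)) = L1 ++ x :: L2 := by
          rw [List.map_append]
          simpa [hmem, ← hEq] using pvDedup_append (E.map (·.2)) x
        have hcongr : ∀ L : List Int, x ∉ L →
            L.flatMap (fun v => pvGaps (pvPos (E ++ [(i, x)]) v))
              = L.flatMap (fun v => pvGaps (pvPos E v)) := by
          intro L hL
          apply pvFlatMap_congr
          intro v hv
          have hxv : x ≠ v := fun h => hL (h ▸ hv)
          rw [pvPos_append]
          simp [hxv]
        have hgx : pvGaps (pvPos (E ++ [(i, x)]) x) = pvGaps (pvPos E x) ++ [i - j + 1] := by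
          rw [pvPos_append]
          simp only [beq_self_eq_true]
          exact pvGaps_append _ i j hlast
        have hsplit : pvFlatG (E ++ [(i, x)])
            = L1.flatMap (fun v => pvGaps (pvPos E v))
              ++ (pvGaps (pvPos E x) ++ [i - j + 1])
              ++ L2.flatMap (fun v => pvGaps (pvPos E v)) := by
          unfold pvFlatG
          rw [hded]
          simp only [List.flatMap_append, List.flatMap_cons]
          rw [hcongr L1 hx1, hcongr L2 hx2, hgx]
          simp [List.append_assoc]
        have hold : pvFlatG E
            = L1.flatMap (fun v => pvGaps (pvPos E v))
              ++ pvGaps (pvPos E x)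
              ++ L2.flatMap (fun v => pvGaps (pvPos E v)) := by
          unfold pvFlatG
          rw [hEq]
          simp [List.append_assoc]
        rw [hold, hsplit, pvFoldl_mid]

theorem pvGroups_getD (E : List (Int × Int)) (v : Int) :
    ((E.foldl (fun d p => d.modify p.2 [] (· ++ [p.1])) PySem.Dict.empty).getD v []) = pvPos E v := by
  have h : E.foldl (fun d p => d.modify p.2 [] (· ++ [p.1])) PySem.Dict.empty
      = (E.map Prod.swap).foldl (fun d q => d.modify q.1 [] (· ++ [q.2])) PySem.Dict.empty := by
    rw [List.foldl_map]
    rfl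
  rw [h, PySem.Dict.getD_foldl_modify_append]
  simp [pvPos, List.filter_map, List.map_map, Function.comp_def]

theorem pvGroups_keys (E : List (Int × Int)) :
    (E.foldl (fun d p => d.modify p.2 [] (· ++ [p.1])) PySem.Dict.empty).keys
      = PySem.List.dedup (E.map (·.2)) := by
  rw [PySem.Dict.keys_foldl_modify_key]
  simp [PySem.Dict.keys_empty, PySem.Set.update_nil_left]

theorem pvGroups_nodup (E : List (Int × Int)) :
    (E.foldl (fun d p => d.modify p.2 [] (· ++ [p.1])) PySem.Dict.empty).keys.Nodup :=
  PySem.Dict.nodup_keys_foldl_modify_key E (·.2) [] _ _ PySem.Dict.nodup_keys_empty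

theorem pvValues_eq (d : PySem.Dict Int (List Int)) (h : d.keys.Nodup) :
    d.values = d.keys.map (fun k => d.getD k []) := by
  show d.items.map (·.2) = (d.items.map (·.1)).map _
  rw [List.map_map]
  refine (List.map_congr_left fun p hp => ?_).symm
  exact PySem.Dict.getD_of_mem_items d (by simpa using hp) h []

theorem pvFoldl_flatMap (l : List Int) (g : Int → List Int) (init : Option Int) :
    l.foldl (fun b v => (g v).foldl pvOm b) init = (l.flatMap g).foldl pvOm init := by
  induction l generalizing init with
  | nil => rfl
  | cons v t ih => simp only [List.foldl_cons, List.flatMap_cons, List.foldl_append, ih]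

theorem pvPerCase (a : List Int) :
    (let st := (PySem.List.enumerate a 0).foldl pvStepA (PySem.Dict.empty, none)
     match st.2 with | none => -1 | some m => m)
    = (let groups := (PySem.List.enumerate a 0).foldl
          (fun d p => d.modify p.2 [] (· ++ [p.1])) PySem.Dict.empty
       let best := groups.values.foldl
         (fun b idxs =>
           (List.zip idxs (PySem.List.slice idxs (some 1) none)).foldl
             (fun b jk => pvOm b (jk.2 - jk.1 + 1)) b) none
       match best with | none => -1 | some m => m) := by
  simp only
  rw [(pvMain (PySem.List.enumerate a 0)).2]
  rw [pvValues_eq _ (pvGroups_nodup (PySem.List.enumerate a 0)), pvGroups_keys,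
    List.foldl_map]
  simp only [pvGroups_getD, PySem.List.slice_from_one, pvZipFold]
  rw [pvFoldl_flatMap]
  rfl

-- ===== VERDICT (by name: the statement is the Claim_ definition above) =====
theorem shortest_dominated_subarrays_spec : Claim_equal_shortest_dominated_subarrays := by
  intro tcs _
  unfold Spec_shortest_dominated_subarrays shortest_dominated_subarrays shortest_dominated_subarrays_alt
  rw [PySem.List.foldl_append_singleton_eq_map, PySem.List.foldl_append_singleton_eq_map]
  exact congrArg _ (List.map_congr_left (fun a _ => pvPerCase a))
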